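-- pv_equiv track=rewrite | github.com/klausfrieler/melospy | melospy/feature_machine/feature_module_cartProd.py | processSingle
-- ===== SOURCE A (Python) =====
-- def processSingle(inputVecs, paddingMode, paddingValue):
--
--     # get vector lengths
--     vecLen = [len(a) for a in inputVecs]
--     maxLen = max(vecLen)
--
--     # padding required?
--     paddingRequired = [x < maxLen for x in vecLen]
--
--     # initialize cartesian product as list of empty tuples
--     cartProd =tuple([] for _ in range(maxLen))
--
--     # fill up cartesian product
--     for i in range(len(inputVecs)):
--         for m in range(maxLen):
--             if paddingRequired[i]:
--                 if paddingMode == "front":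
--                     if m < maxLen - vecLen[i]:
--                         cartProd[m].append(paddingValue)
--                     else:
--                         cartProd[m].append(inputVecs[i][m - maxLen + vecLen[i]])
--                 elif paddingMode == "back":
--                     if m < vecLen[i]:
--                         cartProd[m].append(inputVecs[i][m])
--                     else:
--                         cartProd[m].append(paddingValue)
--                     pass
--                 else:
--                     raise Exception("Non-valid value for padding mode !")
--             else:
--                 cartProd[m].append(inputVecs[i][m])
--
--     return cartProd
-- ===== SOURCE B (Python) =====
-- def processSingle(inputVecs, paddingMode, paddingValue):
--     vecLen = [len(v) for v in inputVecs]
--     maxLen = max(vecLen)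
--     rows = []
--     for v in inputVecs:
--         d = maxLen - len(v)
--         if d == 0:
--             rows.append(list(v))
--         elif paddingMode == "front":
--             rows.append([paddingValue] * d + list(v))
--         elif paddingMode == "back":
--             rows.append(list(v) + [paddingValue] * d)
--         else:
--             raise Exception("Non-valid value for padding mode !")
--     return tuple(list(col) for col in zip(*rows))
-- ===== Notes on version B (the rewrite author's own statement) =====
-- stated objective: simpler
-- what changed: B builds each vector's fully padded row once (prepend/append a replicated padding block) and then transposes the rows with zip(*rows), instead of A's element-by-element nested loop that appends into pre-made column lists with per-cell branch logic.
import Mathlib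
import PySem

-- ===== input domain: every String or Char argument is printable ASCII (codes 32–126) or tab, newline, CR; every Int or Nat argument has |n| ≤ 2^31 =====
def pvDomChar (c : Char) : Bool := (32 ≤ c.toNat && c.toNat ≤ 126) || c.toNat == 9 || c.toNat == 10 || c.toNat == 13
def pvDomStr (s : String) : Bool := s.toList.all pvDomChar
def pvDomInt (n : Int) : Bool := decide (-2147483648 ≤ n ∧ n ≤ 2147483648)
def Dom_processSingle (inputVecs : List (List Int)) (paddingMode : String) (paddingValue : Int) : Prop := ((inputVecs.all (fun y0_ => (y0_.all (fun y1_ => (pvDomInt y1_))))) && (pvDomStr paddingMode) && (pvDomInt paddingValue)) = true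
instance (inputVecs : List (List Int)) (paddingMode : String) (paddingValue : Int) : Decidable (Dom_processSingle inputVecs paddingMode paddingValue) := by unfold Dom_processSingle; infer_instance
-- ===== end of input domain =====

-- B pads each vector to a full row and transposes the rows, replacing A's per-cell
-- nested append loop into column lists: a simpler decomposition, same cost.


-- ===== PORT A =====
-- Literal port of A: vecLen/maxLen, paddingRequired flags, a tuple of maxLen empty
-- column lists, then the nested i/m loop appending one value per cell.  In the
-- branch where Python raises ("Non-valid value for padding mode !") the port
-- appends paddingValue — that branch is excluded by Pre_processSingle.
def processSingle (inputVecs : List (List Int)) (paddingMode : String) (paddingValue : Int) : List (List Int) :=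
  let vecLen : List Int := inputVecs.map (fun a => (a.length : Int))
  let maxLen : Int := ((PySem.List.max? vecLen (fun x => x)).getD 0)  -- max() raises on []: excluded by Pre_
  let paddingRequired : List Bool := vecLen.map (fun x => decide (x < maxLen))
  let cartProd : List (List Int) := (PySem.List.pyRange 0 maxLen 1).map (fun _ => ([] : List Int))
  (PySem.List.pyRange 0 (inputVecs.length : Int) 1).foldl (fun cp i =>
    (PySem.List.pyRange 0 maxLen 1).foldl (fun cp m =>
      let v : Int :=
        if PySem.List.pyGetD paddingRequired i false then
          if paddingMode == "front" then
            if m < maxLen - PySem.List.pyGetD vecLen i 0 then paddingValue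
            else PySem.List.pyGetD (PySem.List.pyGetD inputVecs i []) (m - maxLen + PySem.List.pyGetD vecLen i 0) 0
          else if paddingMode == "back" then
            if m < PySem.List.pyGetD vecLen i 0 then PySem.List.pyGetD (PySem.List.pyGetD inputVecs i []) m 0
            else paddingValue
          else paddingValue  -- Python: raise Exception(...); outside Pre_
        else PySem.List.pyGetD (PySem.List.pyGetD inputVecs i []) m 0
      cp.modify m.toNat (fun c => c ++ [v])) cp) cartProd

-- ===== PORT B =====
-- Literal port of Source B: build padded rows, then transpose via zip(*rows).
-- zip(*rows) is ported exactly: the column count is the minimum row length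
-- (0 when rows is empty) and column m collects rows[j][m] in row order.
def pvZipStar (rows : List (List Int)) : List (List Int) :=
  let n : Nat := match rows with
    | [] => 0
    | r :: rs => rs.foldl (fun acc s => min acc s.length) r.length
  (List.range n).map (fun m => rows.map (fun r => r.getD m 0))

def processSingle_alt (inputVecs : List (List Int)) (paddingMode : String) (paddingValue : Int) : List (List Int) :=
  let vecLen : List Int := inputVecs.map (fun v => (v.length : Int))
  let maxLen : Int := ((PySem.List.max? vecLen (fun x => x)).getD 0)  -- max() raises on []: excluded by Pre_
  let rows : List (List Int) := inputVecs.map (fun v =>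
    let d : Int := maxLen - (v.length : Int)
    if d == 0 then v
    else if paddingMode == "front" then List.replicate d.toNat paddingValue ++ v
    else if paddingMode == "back" then v ++ List.replicate d.toNat paddingValue
    else [])  -- Python: raise Exception(...); outside Pre_
  pvZipStar rows

-- ===== PRECONDITION & SPEC =====
-- Pre_ excludes exactly the inputs where A raises: the empty list (max() raises
-- ValueError) and an invalid padding mode together with unequal vector lengths
-- (the raise branch fires only when some vector actually needs padding).
-- B raises on exactly the same inputs, so there is no crash-fix block.
def Pre_processSingle (inputVecs : List (List Int)) (paddingMode : String) (paddingValue : Int) : Prop :=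
  inputVecs ≠ [] ∧
    (paddingMode = "front" ∨ paddingMode = "back" ∨
      ∀ v ∈ inputVecs, ∀ w ∈ inputVecs, v.length = w.length)
instance (inputVecs : List (List Int)) (paddingMode : String) (paddingValue : Int) : Decidable (Pre_processSingle inputVecs paddingMode paddingValue) := by unfold Pre_processSingle; infer_instance

def pvWitness_processSingle : List (List Int) × String × Int := ([[1, 2], [3]], "back", 0)

def Spec_processSingle (inputVecs : List (List Int)) (paddingMode : String) (paddingValue : Int) (out : List (List Int)) : Prop := out = processSingle_alt inputVecs paddingMode paddingValue
instance (inputVecs : List (List Int)) (paddingMode : String) (paddingValue : Int) (out : List (List Int)) : Decidable (Spec_processSingle inputVecs paddingMode paddingValue out) := by unfold Spec_processSingle; infer_instance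

-- ===== CLAIM (what is proved, stated in full; the proofs are below) =====
def Claim_equal_processSingle : Prop := ∀ (inputVecs : List (List Int)) (paddingMode : String) (paddingValue : Int), Dom_processSingle inputVecs paddingMode paddingValue → Pre_processSingle inputVecs paddingMode paddingValue → Spec_processSingle inputVecs paddingMode paddingValue (processSingle inputVecs paddingMode paddingValue)

-- ===== LEMMAS AND PROOFS =====

def pvMaxLen (L : List (List Int)) : Int :=
  ((PySem.List.max? (L.map (fun a => (a.length : Int))) (fun x => x)).getD 0)

-- the per-cell value A appends for row i, column m (exactly the port's branch expression)
def pvVal (L : List (List Int)) (mode : String) (p : Int) (i m : Int) : Int :=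
  if PySem.List.pyGetD ((L.map (fun a => (a.length : Int))).map (fun x => decide (x < pvMaxLen L))) i false then
    if mode == "front" then
      if m < pvMaxLen L - PySem.List.pyGetD (L.map (fun a => (a.length : Int))) i 0 then p
      else PySem.List.pyGetD (PySem.List.pyGetD L i []) (m - pvMaxLen L + PySem.List.pyGetD (L.map (fun a => (a.length : Int))) i 0) 0
    else if mode == "back" then
      if m < PySem.List.pyGetD (L.map (fun a => (a.length : Int))) i 0 then PySem.List.pyGetD (PySem.List.pyGetD L i []) m 0
      else p
    else p
  else PySem.List.pyGetD (PySem.List.pyGetD L i []) m 0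

-- the padded row B builds for vector v (exactly the port's branch expression)
def pvRow (L : List (List Int)) (mode : String) (p : Int) (v : List Int) : List Int :=
  if (pvMaxLen L - (v.length : Int)) == 0 then v
  else if mode == "front" then List.replicate (pvMaxLen L - (v.length : Int)).toNat p ++ v
  else if mode == "back" then v ++ List.replicate (pvMaxLen L - (v.length : Int)).toNat p
  else []

lemma innerFold_getElem (f : Int → Int) (n : Nat) (cp : List (List Int)) (k : Nat) :
    ((PySem.List.pyRange 0 (n : Int) 1).foldl
        (fun c m => c.modify m.toNat (fun x => x ++ [f m])) cp)[k]?
      = if k < n then cp[k]?.map (fun c => c ++ [f (k : Int)]) else cp[k]? := by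
  induction n generalizing k with
  | zero => simp [PySem.List.pyRange_one_eq_nil (le_refl 0)]
  | succ n ih =>
      have hc : ((n + 1 : Nat) : Int) = (n : Int) + 1 := by push_cast; ring
      rw [hc, PySem.List.pyRange_one_succ_right (by positivity), List.foldl_append]
      simp only [List.foldl_cons, List.foldl_nil, Int.toNat_natCast]
      rw [List.getElem?_modify, ih]
      by_cases h1 : k < n
      · have : n ≠ k := by omega
        simp [h1, Nat.lt_succ_of_lt h1, this]
      · by_cases h2 : k = n
        · subst h2; simp
        · have hne : n ≠ k := fun h => h2 h.symm
          have hkn : ¬ k ≤ n := by omega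
          simp [hne, hkn, h1]

lemma pvMaxLen_nonneg (L : List (List Int)) : 0 ≤ pvMaxLen L := by
  unfold pvMaxLen
  cases h : PySem.List.max? (L.map (fun a => (a.length : Int))) (fun x => x) with
  | none => simp
  | some m =>
      have hm := PySem.List.max?_mem h
      simp only [List.mem_map] at hm
      obtain ⟨v, _, hv⟩ := hm
      simp [← hv]

lemma pvMaxLen_le (L : List (List Int)) (v : List Int) (hv : v ∈ L) :
    (v.length : Int) ≤ pvMaxLen L := by
  unfold pvMaxLen
  cases h : PySem.List.max? (L.map (fun a => (a.length : Int))) (fun x => x) with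
  | none =>
      rw [PySem.List.max?_eq_none_iff, List.map_eq_nil_iff] at h
      subst h; simp at hv
  | some m =>
      have := PySem.List.max?_isMax h ((v.length : Int)) (List.mem_map_of_mem hv)
      simpa using this

lemma pvMaxLen_eq_of_all_eq (L : List (List Int)) (hne : L ≠ [])
    (heq : ∀ v ∈ L, ∀ w ∈ L, v.length = w.length) (v : List Int) (hv : v ∈ L) :
    (v.length : Int) = pvMaxLen L := by
  unfold pvMaxLen
  cases h : PySem.List.max? (L.map (fun a => (a.length : Int))) (fun x => x) with
  | none =>
      rw [PySem.List.max?_eq_none_iff, List.map_eq_nil_iff] at h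
      subst h; simp at hv
  | some m =>
      have hm := PySem.List.max?_mem h
      simp only [List.mem_map] at hm
      obtain ⟨w, hw, hwm⟩ := hm
      have := heq v hv w hw
      simp [← hwm, this]

lemma outerFold_getElem (g : Int → Int → Int) (n : Nat) (is : List Int)
    (cp : List (List Int)) (k : Nat) :
    ((is.foldl (fun c i => (PySem.List.pyRange 0 (n : Int) 1).foldl
        (fun c m => c.modify m.toNat (fun x => x ++ [g i m])) c) cp)[k]?)
      = if k < n then cp[k]?.map (fun c => c ++ is.map (fun i => g i (k : Int))) else cp[k]? := by
  induction is generalizing cp with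
  | nil => cases h : cp[k]? <;> split <;> simp [h]
  | cons i is ih =>
      rw [List.foldl_cons, ih]
      rw [innerFold_getElem (f := g i) n cp k]
      by_cases hk : k < n
      · simp only [hk, if_pos]
        cases h : cp[k]? <;> simp
      · simp [hk]

lemma A_char (L : List (List Int)) (mode : String) (p : Int) :
    processSingle L mode p = (List.range (pvMaxLen L).toNat).map
      (fun k : Nat => (PySem.List.pyRange 0 (L.length : Int) 1).map
        (fun i => pvVal L mode p i (Int.ofNat k))) := by
  have hA : processSingle L mode p =
      (PySem.List.pyRange 0 (L.length : Int) 1).foldl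
        (fun cp i => (PySem.List.pyRange 0 (pvMaxLen L) 1).foldl
          (fun cp m => cp.modify m.toNat (fun c => c ++ [pvVal L mode p i m])) cp)
        ((PySem.List.pyRange 0 (pvMaxLen L) 1).map (fun _ => ([] : List Int))) := rfl
  have hM : ((pvMaxLen L).toNat : Int) = pvMaxLen L := Int.toNat_of_nonneg (pvMaxLen_nonneg L)
  rw [hA]
  rw [show PySem.List.pyRange 0 (pvMaxLen L) =
      PySem.List.pyRange 0 (((pvMaxLen L).toNat : Nat) : Int) from by rw [hM]]
  apply List.ext_getElem?
  intro k
  rw [outerFold_getElem (g := fun i m => pvVal L mode p i m)]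
  by_cases hk : k < (pvMaxLen L).toNat
  · have h1 : ((PySem.List.pyRange 0 (((pvMaxLen L).toNat : Nat) : Int) 1).map (fun _ => ([] : List Int)))[k]? = some [] := by
      rw [List.getElem?_map]
      rw [List.getElem?_eq_getElem (by simp [PySem.List.length_pyRange_one]; omega)]
      simp
    rw [if_pos hk, h1, List.getElem?_map, List.getElem?_range hk]
    simp
  · have h1 : ((PySem.List.pyRange 0 (((pvMaxLen L).toNat : Nat) : Int) 1).map (fun _ => ([] : List Int)))[k]? = none := by
      rw [List.getElem?_eq_none_iff]
      simp [PySem.List.length_pyRange_one]; omega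
    rw [if_neg hk, h1, List.getElem?_map,
      List.getElem?_eq_none_iff.mpr (by simp; omega)]
    simp

lemma foldl_min_const (n : Nat) (rs : List (List Int)) (acc : Nat)
    (h : ∀ s ∈ rs, s.length = n) (ha : acc = n) :
    rs.foldl (fun a s => min a s.length) acc = n := by
  induction rs generalizing acc with
  | nil => simpa using ha
  | cons r rs ih =>
      rw [List.foldl_cons]
      exact ih (min acc r.length) (fun s hs => h s (List.mem_cons_of_mem r hs))
        (by rw [ha, h r List.mem_cons_self]; omega)

lemma B_char (L : List (List Int)) (mode : String) (p : Int) (hne : L ≠ [])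
    (hrow : ∀ v ∈ L, (pvRow L mode p v).length = (pvMaxLen L).toNat) :
    processSingle_alt L mode p = (List.range (pvMaxLen L).toNat).map
      (fun k => (L.map (pvRow L mode p)).map (fun r => r.getD k 0)) := by
  have hB : processSingle_alt L mode p = pvZipStar (L.map (pvRow L mode p)) := rfl
  rw [hB]
  unfold pvZipStar
  cases hL : L with
  | nil => exact absurd hL hne
  | cons v vs =>
      subst hL
      simp only [List.map_cons]
      have hn : (List.map (pvRow (v :: vs) mode p) vs).foldl (fun a s => min a s.length)
          (pvRow (v :: vs) mode p v).length = (pvMaxLen (v :: vs)).toNat := by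
        apply foldl_min_const
        · intro s hs
          simp only [List.mem_map] at hs
          obtain ⟨w, hw, rfl⟩ := hs
          exact hrow w (List.mem_cons_of_mem v hw)
        · exact hrow v List.mem_cons_self
      rw [hn]

lemma pvRow_length (L : List (List Int)) (mode : String) (p : Int) (v : List Int)
    (hv : v ∈ L)
    (hmode : mode = "front" ∨ mode = "back" ∨ (v.length : Int) = pvMaxLen L) :
    (pvRow L mode p v).length = (pvMaxLen L).toNat := by
  have hle := pvMaxLen_le L v hv
  unfold pvRow
  by_cases hd : pvMaxLen L - (v.length : Int) = 0
  · simp only [hd, beq_self_eq_true, if_pos]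
    omega
  · rw [if_neg (by simpa using hd)]
    rcases hmode with hm | hm | hm
    · subst hm
      simp only [beq_self_eq_true, if_pos, List.length_append, List.length_replicate]
      omega
    · subst hm
      rw [if_neg (by decide), if_pos (by decide)]
      simp only [List.length_append, List.length_replicate]
      omega
    · omega

lemma getD_replicate_append (D : Nat) (p : Int) (v : List Int) (k : Nat) :
    (List.replicate D p ++ v).getD k 0 = if k < D then p else v.getD (k - D) 0 := by
  by_cases hk : k < D
  · rw [if_pos hk, List.getD_eq_getElem _ _ (by simp; omega),
      List.getElem_append_left (by simpa using hk)]
    simp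
  · rw [if_neg hk]
    by_cases hk2 : k - D < v.length
    · rw [List.getD_eq_getElem _ _ (by simp; omega),
        List.getElem_append_right (by simpa using hk),
        List.getD_eq_getElem _ _ hk2]
      simp
    · rw [List.getD_eq_default _ _ (by simp; omega), List.getD_eq_default _ _ (by omega)]

lemma getD_append_replicate (v : List Int) (D : Nat) (p : Int) (k : Nat)
    (hk2 : k < v.length + D) :
    (v ++ List.replicate D p).getD k 0 = if k < v.length then v.getD k 0 else p := by
  by_cases hk : k < v.length
  · rw [if_pos hk, List.getD_eq_getElem _ _ (by simp; omega),
      List.getElem_append_left hk, List.getD_eq_getElem _ _ hk]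
  · rw [if_neg hk, List.getD_eq_getElem _ _ (by simp; omega),
      List.getElem_append_right (by omega)]
    simp

lemma pvRow_eq_self (L : List (List Int)) (mode : String) (p : Int) (v : List Int)
    (hd : pvMaxLen L - (v.length : Int) = 0) : pvRow L mode p v = v := by
  unfold pvRow
  rw [if_pos (show ((pvMaxLen L - (v.length : Int)) == 0) = true from by simpa using hd)]

lemma pvRow_eq_front (L : List (List Int)) (p : Int) (v : List Int)
    (hd : pvMaxLen L - (v.length : Int) ≠ 0) :
    pvRow L "front" p v = List.replicate (pvMaxLen L - (v.length : Int)).toNat p ++ v := by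
  unfold pvRow
  rw [if_neg (show ¬ ((pvMaxLen L - (v.length : Int)) == 0) = true from by simpa using hd),
      if_pos (show (("front" : String) == "front") = true from by decide)]

lemma pvRow_eq_back (L : List (List Int)) (p : Int) (v : List Int)
    (hd : pvMaxLen L - (v.length : Int) ≠ 0) :
    pvRow L "back" p v = v ++ List.replicate (pvMaxLen L - (v.length : Int)).toNat p := by
  unfold pvRow
  rw [if_neg (show ¬ ((pvMaxLen L - (v.length : Int)) == 0) = true from by simpa using hd),
      if_neg (show ¬ (("back" : String) == "front") = true from by decide),
      if_pos (show (("back" : String) == "back") = true from by decide)]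

lemma pvVal_eq_row (L : List (List Int)) (mode : String) (p : Int)
    (j : Nat) (hj : j < L.length) (k : Nat) (hk : k < (pvMaxLen L).toNat)
    (hmode : mode = "front" ∨ mode = "back" ∨ (L[j].length : Int) = pvMaxLen L) :
    pvVal L mode p (Int.ofNat j) (Int.ofNat k) = (pvRow L mode p L[j]).getD k 0 := by
  have hle := pvMaxLen_le L L[j] (L.getElem_mem hj)
  have hM := pvMaxLen_nonneg L
  unfold pvVal
  simp only [Int.ofNat_eq_natCast, PySem.List.pyGetD_natCast]
  rw [List.getD_eq_getElem _ _ (by simpa using hj),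
      List.getD_eq_getElem _ _ (by simpa using hj),
      List.getD_eq_getElem _ _ hj]
  simp only [List.getElem_map]
  by_cases h : (L[j].length : Int) < pvMaxLen L
  · rw [if_pos (by simpa using h)]
    rcases hmode with hm | hm | hm
    · subst hm
      rw [pvRow_eq_front L p L[j] (by omega),
        if_pos (show (("front" : String) == "front") = true from by decide)]
      rw [getD_replicate_append]
      by_cases hkd : (k : Int) < pvMaxLen L - (L[j].length : Int)
      · rw [if_pos hkd, if_pos (by omega)]
      · rw [if_neg hkd, if_neg (by omega)]
        rw [PySem.List.pyGetD_eq_getElem _ _ (by omega) (by omega)]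
        rw [List.getD_eq_getElem _ _ (by omega)]
        congr 1
        omega
    · subst hm
      rw [pvRow_eq_back L p L[j] (by omega),
        if_neg (show ¬ (("back" : String) == "front") = true from by decide),
        if_pos (show (("back" : String) == "back") = true from by decide)]
      rw [getD_append_replicate _ _ _ _ (by simp; omega)]
      by_cases hkv : (k : Int) < (L[j].length : Int)
      · rw [if_pos hkv, if_pos (by omega)]
      · rw [if_neg hkv, if_neg (by omega)]
    · omega
  · rw [if_neg (by simpa using h), pvRow_eq_self L mode p L[j] (by omega)]

theorem processSingle_spec : Claim_equal_processSingle := by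
  intro L mode p _ hpre
  obtain ⟨hne, hmode⟩ := hpre
  have hmode' : ∀ v ∈ L, mode = "front" ∨ mode = "back" ∨ (v.length : Int) = pvMaxLen L := by
    intro v hv
    rcases hmode with hm | hm | hm
    · exact Or.inl hm
    · exact Or.inr (Or.inl hm)
    · exact Or.inr (Or.inr (pvMaxLen_eq_of_all_eq L hne hm v hv))
  unfold Spec_processSingle
  rw [A_char, B_char L mode p hne (fun v hv => pvRow_length L mode p v hv (hmode' v hv))]
  apply List.map_congr_left
  intro k hk
  rw [List.mem_range] at hk
  rw [PySem.List.pyRange_one 0 (L.length : Int)]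
  rw [List.map_map, List.map_map]
  apply List.ext_getElem
  · simp
  · intro j h1 h2
    simp only [List.getElem_map, List.getElem_range, Function.comp_apply]
    have hj : j < L.length := by simpa using h2
    have := pvVal_eq_row L mode p j hj k hk (hmode' L[j] (L.getElem_mem hj))
    simpa [Int.ofNat_eq_natCast] using this
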